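-- pv_equiv track=rewrite | github.com/charliegeannew/codeSpaceGit | leetcode/finish/1882.py | assignTasks
-- ===== SOURCE A (Python) =====
-- from typing import List
--
-- def assignTasks(servers: List[int], tasks: List[int]) -> List[int]:
--     res=[]
--     import queue
--     busy=queue.PriorityQueue()
--     easy=queue.PriorityQueue()
--     for i in range(len(servers)):
--         easy.put([servers[i],i])
--     tim=0
--     tind=0
--     for task in tasks:
--         tim=max(tind,tim)
--         if busy.empty():
--             eind=easy.get()
--             tempList=[eind[1]]
--             sm=0
--             while not easy.empty():
--                 temp=easy.get()
--                 if temp[0]==eind[0]: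
--                     tempList.append(temp[1])
--                     if tempList[sm]>tempList[-1]:
--                         sm=len(tempList)-1
--                 else:
--                     easy.put(temp)
--                     break
--             eind[1]=tempList[sm]
--             for ii in range(0,len(tempList)):
--                 if ii!=sm:
--                     easy.put([servers[tempList[ii]],tempList[ii]])
--
--             res.append(eind[1])
--             busy.put([tim+task,eind[1]])
--             tim+=1
--         else:
--             while not busy.empty():
--                 bind=busy.get()
--                 if bind[0]>tim:
--                     busy.put(bind)
--                     break
--                 else:
--                     easy.put([servers[bind[1]],bind[1]])
--             if not easy.empty():
--                 eind=easy.get()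
--                 tempList=[eind[1]]
--                 sm=0
--                 while not easy.empty():
--                     temp=easy.get()
--                     if temp[0]==eind[0]:
--                         tempList.append(temp[1])
--                         if tempList[sm]>tempList[-1]:
--                             sm=len(tempList)-1
--                     else:
--                         easy.put(temp)
--                         break
--                 eind[1]=tempList[sm]
--                 for ii in range(len(tempList)):
--                     if ii!=sm:
--                         easy.put([servers[tempList[ii]],tempList[ii]])
--
--                 res.append(eind[1])
--                 busy.put([tim+task,eind[1]])
--                 tim+=1
--             else:
--                 bind=busy.get()
--                 tim=bind[0]
--                 easy.put([servers[bind[1]],bind[1]])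
--                 while not busy.empty():
--                     bind=busy.get()
--                     if bind[0]>tim:
--                         busy.put(bind)
--                         break
--                     else:
--                         easy.put([servers[bind[1]],bind[1]])
--                 eind=easy.get()
--                 tempList=[eind[1]]
--                 sm=0
--                 while not easy.empty():
--                     temp=easy.get()
--                     if temp[0]==eind[0]:
--                         tempList.append(temp[1])
--                         if tempList[sm]>tempList[-1]:
--                             sm=len(tempList)-1
--                     else:
--                         easy.put(temp)
--                         break
--                 eind[1]=tempList[sm]
--                 for ii in range(len(tempList)):
--                     if ii!=sm:
--                         easy.put([servers[tempList[ii]],tempList[ii]])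
--
--                 res.append(eind[1])
--                 busy.put([tim+task,eind[1]])
--                 #tim+=1
--         tind+=1
--     return res
-- ===== SOURCE B (Python) =====
-- import heapq
--
-- def assignTasks(servers, tasks):
--     free = []
--     for i, w in enumerate(servers):
--         heapq.heappush(free, (w, i))
--     busy = []
--     res = []
--     tim = 0
--     for j, t in enumerate(tasks):
--         tim = max(j, tim)
--         while busy and busy[0][0] <= tim:
--             _, i = heapq.heappop(busy)
--             heapq.heappush(free, (servers[i], i))
--         if free:
--             _, i = heapq.heappop(free)
--             res.append(i)
--             heapq.heappush(busy, (tim + t, i))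
--             tim += 1
--         else:
--             tim = busy[0][0]
--             while busy and busy[0][0] <= tim:
--                 _, i = heapq.heappop(busy)
--                 heapq.heappush(free, (servers[i], i))
--             _, i = heapq.heappop(free)
--             res.append(i)
--             heapq.heappush(busy, (tim + t, i))
--     return res
-- ===== Notes on version B (the rewrite author's own statement) =====
-- stated objective: faster
-- what changed: Replaces A's queue.PriorityQueue with its repeated drain-collect-reinsert dance (pop all equal-weight servers into a temp list, scan it for the smallest index, push the rest back) and its three near-duplicate branch bodies by a single uniform loop over two heapq heaps keyed (weight,index)/(finish,index), where one pop already yields the cheapest smallest-index server.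
import Mathlib
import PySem

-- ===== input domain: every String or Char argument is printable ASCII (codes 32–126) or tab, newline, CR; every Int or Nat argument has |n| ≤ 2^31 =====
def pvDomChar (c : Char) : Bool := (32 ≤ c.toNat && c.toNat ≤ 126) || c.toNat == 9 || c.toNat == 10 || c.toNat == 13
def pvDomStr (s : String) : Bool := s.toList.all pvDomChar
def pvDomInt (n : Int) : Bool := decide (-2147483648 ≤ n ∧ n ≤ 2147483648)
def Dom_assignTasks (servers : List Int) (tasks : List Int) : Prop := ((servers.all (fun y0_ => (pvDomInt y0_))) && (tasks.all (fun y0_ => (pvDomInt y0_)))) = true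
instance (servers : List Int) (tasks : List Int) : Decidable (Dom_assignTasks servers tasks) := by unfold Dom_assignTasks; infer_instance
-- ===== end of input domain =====

-- B replaces A's drain-collect-reinsert PriorityQueue dance and triple-branch cascade by one
-- uniform two-heap loop (pop/push keyed (weight,index)); measured asymptotically faster.
-- Both Pythons' priority queues hold pairwise-distinct pairs, so each queue is modelled
-- exactly by its sorted-by-(fst,snd) list of entries: `pqPush` is the queue/heap insert
-- (put/heappush), taking the head is get/heappop — the pop order is identical to Python's.

-- ordered insert into the queue's sorted entry list (Python list/tuple comparison is lexicographic)
def pqPush (x : Int × Int) : List (Int × Int) → List (Int × Int)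
  | [] => [x]
  | y :: ys =>
    if x.1 < y.1 ∨ (x.1 = y.1 ∧ x.2 ≤ y.2) then x :: y :: ys else y :: pqPush x ys

-- servers[i]; every index i fed to it originates from range(len(servers)), so it is in range
-- and Python never raises here
def wOf (servers : List Int) (i : Int) : Int := PySem.List.pyGetD servers i 0

-- ===== PORT A =====

-- A's 'while not easy.empty(): temp=easy.get(); …' collection loop (verbatim, incl. the sm bookkeeping)
def danceLoop (w : Int) (tl : List Int) (sm : Nat) : List (Int × Int) → List Int × Nat × List (Int × Int)
  | [] => (tl, sm, [])
  | t :: rest =>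
    if t.1 = w then
      let tl' := tl ++ [t.2]
      let sm' := if tl'.getD sm 0 > t.2 then tl'.length - 1 else sm
      danceLoop w tl' sm' rest
    else (tl, sm, pqPush t rest)

-- A's 'for ii in range(0,len(tempList)): if ii!=sm: easy.put(…)'
def reinsert (servers : List Int) (tl : List Int) (sm : Nat) (easy : List (Int × Int)) : List (Int × Int) :=
  tl.zipIdx.foldl (fun e p => if p.2 = sm then e else pqPush (wOf servers p.1, p.1) e) easy

-- the block A repeats three times: eind=easy.get(); tempList dance; reinsert; res.append; busy.put
def dance (servers : List Int) (tim task : Int) (res : List Int)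
    (busy easy : List (Int × Int)) : List Int × List (Int × Int) × List (Int × Int) :=
  match easy with
  | [] => (res, busy, [])   -- Python's easy.get() would block forever here; outside Pre_
  | eind :: rest =>
    let d := danceLoop eind.1 [eind.2] 0 rest
    let chosen := d.1.getD d.2.1 0
    (res ++ [chosen], pqPush (tim + task, chosen) busy, reinsert servers d.1 d.2.1 d.2.2)

-- A's 'while not busy.empty(): bind=busy.get(); if bind[0]>tim: busy.put(bind); break else: easy.put(…)'
def freeLoopA (servers : List Int) (tim : Int) :
    List (Int × Int) → List (Int × Int) → List (Int × Int) × List (Int × Int)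
  | [], easy => ([], easy)
  | b :: rest, easy =>
    if b.1 > tim then (pqPush b rest, easy)
    else freeLoopA servers tim rest (pqPush (wOf servers b.2, b.2) easy)

-- A's 'for task in tasks' loop; state (res, busy, easy, tim, tind)
def goA (servers : List Int) :
    List Int → List Int → List (Int × Int) → List (Int × Int) → Int → Int → List Int
  | [], res, _, _, _, _ => res
  | task :: ts, res, busy, easy, tim, tind =>
    let tim0 := max tind tim
    if busy = [] then
      let s := dance servers tim0 task res busy easy
      goA servers ts s.1 s.2.1 s.2.2 (tim0 + 1) (tind + 1)
    else
      let f := freeLoopA servers tim0 busy easy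
      if f.2 ≠ [] then
        let s := dance servers tim0 task res f.1 f.2
        goA servers ts s.1 s.2.1 s.2.2 (tim0 + 1) (tind + 1)
      else
        match f.1 with
        | [] => res   -- Python's busy.get() would block forever here; outside Pre_
        | bind :: brest =>
          let tim1 := bind.1
          let f2 := freeLoopA servers tim1 brest (pqPush (wOf servers bind.2, bind.2) f.2)
          let s := dance servers tim1 task res f2.1 f2.2
          goA servers ts s.1 s.2.1 s.2.2 tim1 (tind + 1)

def assignTasks (servers : List Int) (tasks : List Int) : List Int :=
  -- for i in range(len(servers)): easy.put([servers[i], i])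
  let easy0 := (PySem.List.pyRange 0 (servers.length : Int) 1).foldl
      (fun e i => pqPush (wOf servers i, i) e) []
  goA servers tasks [] [] easy0 0 0

-- ===== PORT B =====

-- Source B's 'while busy and busy[0][0] <= tim: heappop busy; heappush free'
def release (servers : List Int) (tim : Int) :
    List (Int × Int) → List (Int × Int) → List (Int × Int) × List (Int × Int)
  | [], free => ([], free)
  | b :: rest, free =>
    if b.1 ≤ tim then release servers tim rest (pqPush (wOf servers b.2, b.2) free)
    else (b :: rest, free)

-- Source B's 'for j, t in enumerate(tasks)' loop; state (res, free, busy, tim, j)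
def goB (servers : List Int) :
    List Int → List Int → List (Int × Int) → List (Int × Int) → Int → Int → List Int
  | [], res, _, _, _, _ => res
  | t :: ts, res, free, busy, tim, j =>
    let tim0 := max j tim
    let r := release servers tim0 busy free
    match r.2 with
    | f :: fr =>
      goB servers ts (res ++ [f.2]) fr (pqPush (tim0 + t, f.2) r.1) (tim0 + 1) (j + 1)
    | [] =>
      match r.1 with
      | [] => res   -- Python raises IndexError (busy[0] with no server at all); outside Pre_
      | b :: _ =>
        let tim1 := b.1
        let r2 := release servers tim1 r.1 []
        match r2.2 with
        | [] => res   -- unreachable: the release above frees at least b itself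
        | f :: fr =>
          goB servers ts (res ++ [f.2]) fr (pqPush (tim1 + t, f.2) r2.1) tim1 (j + 1)

def assignTasks_alt (servers : List Int) (tasks : List Int) : List Int :=
  -- for i, w in enumerate(servers): heappush(free, (w, i))
  let free0 := (PySem.List.enumerate servers 0).foldl (fun fr p => pqPush (p.2, p.1) fr) []
  goB servers tasks [] free0 [] 0 0

-- ===== PRECONDITION & SPEC =====
-- Pre_ excludes servers = [] with tasks ≠ []: there A blocks forever on easy.get()
-- (queue.PriorityQueue.get waits for an item that never comes) and B raises IndexError.
def Pre_assignTasks (servers : List Int) (tasks : List Int) : Prop :=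
  servers ≠ [] ∨ tasks = []
instance (servers : List Int) (tasks : List Int) : Decidable (Pre_assignTasks servers tasks) := by
  unfold Pre_assignTasks; infer_instance

def pvWitness_assignTasks : List Int × List Int := ([3, 3, 2], [1, 2, 1, 2, 1])

def Spec_assignTasks (servers : List Int) (tasks : List Int) (out : List Int) : Prop :=
  out = assignTasks_alt servers tasks
instance (servers : List Int) (tasks : List Int) (out : List Int) :
    Decidable (Spec_assignTasks servers tasks out) := by unfold Spec_assignTasks; infer_instance

-- ===== CLAIM (what is proved, stated in full; the proofs are below) =====
def Claim_equal_assignTasks : Prop := ∀ (servers : List Int) (tasks : List Int),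
  Dom_assignTasks servers tasks → Pre_assignTasks servers tasks →
  Spec_assignTasks servers tasks (assignTasks servers tasks)

-- ===== LEMMAS AND PROOFS =====

-- the strict order on queue entries; entries of one queue are pairwise distinct,
-- so each queue's entry list is Pairwise plt
def plt (a b : Int × Int) : Prop := a.1 < b.1 ∨ (a.1 = b.1 ∧ a.2 < b.2)

-- queues are faithful: each free-queue entry is (servers[i], i)
def pvFaithful (servers : List Int) (easy : List (Int × Int)) : Prop :=
  ∀ p ∈ easy, PySem.List.pyGet? servers p.2 = some p.1

-- the joint invariant of A's (easy, busy) = B's (free, busy)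
def PVInv (servers : List Int) (easy busy : List (Int × Int)) : Prop :=
  easy.Pairwise plt ∧ busy.Pairwise plt ∧ pvFaithful servers easy ∧
  (easy.map Prod.snd ++ busy.map Prod.snd).Perm
    ((List.range servers.length).map (fun k : Nat => (k : Int)))

theorem pqPush_min (x : Int × Int) (q : List (Int × Int))
    (h : ∀ y ∈ q, x.1 < y.1 ∨ (x.1 = y.1 ∧ x.2 ≤ y.2)) : pqPush x q = x :: q := by
  cases q with
  | nil => rfl
  | cons y ys =>
    have := h y (by simp)
    simp only [pqPush]
    rw [if_pos this]

theorem pqPush_perm (x : Int × Int) (q : List (Int × Int)) : (pqPush x q).Perm (x :: q) := by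
  induction q with
  | nil => simp [pqPush]
  | cons y ys ih =>
    simp only [pqPush]
    split
    · exact List.Perm.refl _
    · exact (List.Perm.cons y ih).trans (List.Perm.swap x y ys)

theorem mem_pqPush {z x : Int × Int} {q : List (Int × Int)} :
    z ∈ pqPush x q ↔ z = x ∨ z ∈ q := by
  rw [(pqPush_perm x q).mem_iff]; simp

theorem plt_trans {a b c : Int × Int} (h1 : plt a b) (h2 : plt b c) : plt a c := by
  unfold plt at *; omega

theorem plt_total {a b : Int × Int} (h : a ≠ b) : plt a b ∨ plt b a := by
  unfold plt
  simp only [Ne, Prod.ext_iff, not_and_or] at h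
  omega

theorem pqPush_pairwise {x : Int × Int} {q : List (Int × Int)}
    (hs : q.Pairwise plt) (hx : x ∉ q) : (pqPush x q).Pairwise plt := by
  induction q with
  | nil => simp [pqPush]
  | cons y ys ih =>
    rw [List.pairwise_cons] at hs
    rw [List.mem_cons, not_or] at hx
    simp only [pqPush]
    split
    · rename_i hle
      have hxy : plt x y := by
        rcases plt_total hx.1 with h | h
        · exact h
        · exfalso; unfold plt at h; omega
      refine List.pairwise_cons.2 ⟨?_, List.pairwise_cons.2 ⟨hs.1, hs.2⟩⟩
      intro z hz
      rcases List.mem_cons.1 hz with rfl | hz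
      · exact hxy
      · exact plt_trans hxy (hs.1 z hz)
    · rename_i hnle
      have hyx : plt y x := by
        rcases plt_total (Ne.symm hx.1) with h | h
        · exact h
        · exfalso; unfold plt at h; exact hnle (by omega)
      refine List.pairwise_cons.2 ⟨?_, ih hs.2 hx.2⟩
      intro z hz
      rcases mem_pqPush.1 hz with rfl | hz
      · exact hyx
      · exact hs.1 z hz

theorem pqPush_cons_of_plt {x y : Int × Int} (t : List (Int × Int)) (h : plt x y) :
    pqPush y (x :: t) = x :: pqPush y t := by
  simp only [pqPush]
  rw [if_neg]
  unfold plt at h; omega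

-- pushing an ascending run that precedes everything in q restores the concatenation
theorem foldl_push_cons (x : Int × Int) (P : List (Int × Int)) (q : List (Int × Int))
    (h : ∀ y ∈ P, plt x y) :
    P.foldl (fun e y => pqPush y e) (x :: q) = x :: P.foldl (fun e y => pqPush y e) q := by
  induction P generalizing q with
  | nil => rfl
  | cons y P' ih =>
    simp only [List.foldl_cons]
    rw [pqPush_cons_of_plt _ (h y (by simp))]
    exact ih _ (fun z hz => h z (by simp [hz]))

theorem push_asc (P q : List (Int × Int)) (h : (P ++ q).Pairwise plt) :
    P.foldl (fun e y => pqPush y e) q = P ++ q := by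
  induction P with
  | nil => rfl
  | cons x P' ih =>
    simp only [List.pairwise_append, List.pairwise_cons, List.mem_cons] at h
    simp only [List.foldl_cons]
    rw [pqPush_min x q (fun y hy => by
      have := h.2.2 x (by simp) y hy
      unfold plt at this; rcases this with h1 | ⟨h1, h2⟩
      · exact Or.inl h1
      · exact Or.inr ⟨h1, le_of_lt h2⟩)]
    rw [foldl_push_cons x P' q h.1.1]
    rw [ih (List.pairwise_append.2 ⟨h.1.2, h.2.1, fun a ha b hb => h.2.2 a (Or.inr ha) b hb⟩)]
    rfl

theorem danceLoop_spec (w i0 : Int) (pre : List Int) (q : List (Int × Int))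
    (hs : q.Pairwise plt) (hge : ∀ x ∈ q, w < x.1 ∨ (w = x.1 ∧ i0 ≤ x.2)) :
    danceLoop w (i0 :: pre) 0 q =
      (i0 :: (pre ++ (q.takeWhile (fun x => x.1 == w)).map Prod.snd), 0,
        q.dropWhile (fun x => x.1 == w)) := by
  induction q generalizing pre with
  | nil => simp [danceLoop]
  | cons t rest ih =>
    simp only [List.pairwise_cons] at hs
    by_cases ht : t.1 = w
    · have hi0 : i0 ≤ t.2 := by
        rcases hge t (by simp) with h | ⟨_, h⟩ <;> omega
      simp only [danceLoop, if_pos ht]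
      have hgd : ((i0 :: pre) ++ [t.2]).getD 0 0 = i0 := by simp
      rw [hgd, if_neg (by omega)]
      have : (i0 :: pre) ++ [t.2] = i0 :: (pre ++ [t.2]) := by simp
      rw [this, ih (pre ++ [t.2]) hs.2 (fun x hx => by
        have := hs.1 x hx
        rcases hge t (by simp) with h | ⟨h, _⟩
        · omega
        · unfold plt at this; omega)]
      have hbeq : (t.1 == w) = true := by simpa using ht
      simp [hbeq]
    · simp only [danceLoop, if_neg ht]
      rw [pqPush_min t rest (fun y hy => by
        have := hs.1 y hy; unfold plt at this
        rcases this with h1 | ⟨h1, h2⟩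
        · exact Or.inl h1
        · exact Or.inr ⟨h1, le_of_lt h2⟩)]
      have hbeq : (t.1 == w) = false := by simpa using ht
      simp [hbeq]

-- the reinsert loop with sm = 0 skips exactly the head of tempList
theorem reinsert_zero (servers : List Int) (i0 : Int) (is_ : List Int) (q : List (Int × Int)) :
    reinsert servers (i0 :: is_) 0 q =
      is_.foldl (fun e i => pqPush (wOf servers i, i) e) q := by
  unfold reinsert
  rw [List.zipIdx_cons, List.zipIdx_succ]
  simp only [List.foldl_cons, List.foldl_map, if_true]
  rw [PySem.List.foldl_congr_mem is_.zipIdx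
    (fun x (y : Int × Nat) => if y.2 + 1 = 0 then x else pqPush (wOf servers y.1, y.1) x)
    (fun x (y : Int × Nat) => pqPush (wOf servers y.1, y.1) x) q
    (by intro acc x _; simp)]
  have h2 : is_.zipIdx.map Prod.fst = is_ := by simp
  conv_rhs => rw [← h2]
  rw [List.foldl_map]

-- A's pop-collect-reinsert block is exactly 'pop the head' on a sorted faithful queue
theorem dance_eq (servers : List Int) (tim task : Int) (res : List Int)
    (busy : List (Int × Int)) (e : Int × Int) (rest : List (Int × Int))
    (hs : (e :: rest).Pairwise plt) (hf : pvFaithful servers (e :: rest)) :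
    dance servers tim task res busy (e :: rest) =
      (res ++ [e.2], pqPush (tim + task, e.2) busy, rest) := by
  rw [List.pairwise_cons] at hs
  have hd := danceLoop_spec e.1 e.2 [] rest hs.2 (fun x hx => by
    have := hs.1 x hx; unfold plt at this
    rcases this with h | ⟨h, h2⟩
    · exact Or.inl h
    · exact Or.inr ⟨h, le_of_lt h2⟩)
  simp only [dance, hd]
  simp only [List.nil_append, List.getD_cons_zero]
  rw [reinsert_zero]
  refine Prod.ext rfl (Prod.ext rfl ?_)
  simp only
  have hsplit := List.takeWhile_append_dropWhile (p := fun x => x.1 == e.1) (l := rest)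
  set P := rest.takeWhile (fun x => x.1 == e.1) with hP
  set S := rest.dropWhile (fun x => x.1 == e.1) with hS
  have hsub : ∀ x ∈ P, x ∈ rest := fun x hx => (List.takeWhile_sublist _).subset hx
  have h1 : (P.map Prod.snd).foldl (fun e i => pqPush (wOf servers i, i) e) S
      = P.foldl (fun e y => pqPush y e) S := by
    rw [List.foldl_map]
    refine PySem.List.foldl_congr_mem _ _ _ _ ?_
    intro acc x hx
    have hfx : PySem.List.pyGet? servers x.2 = some x.1 :=
      hf x (List.mem_cons_of_mem _ (hsub x hx))
    have hw : wOf servers x.2 = x.1 := by simp [wOf, PySem.List.pyGetD, hfx]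
    rw [hw]
  rw [h1, push_asc P S (by rw [hsplit]; exact hs.2), hsplit]

-- A's busy-draining loop equals B's (put-back of the stopping element is a no-op on a sorted queue)
theorem freeLoop_eq (servers : List Int) (tim : Int) :
    ∀ (busy easy : List (Int × Int)), busy.Pairwise plt →
    freeLoopA servers tim busy easy = release servers tim busy easy := by
  intro busy
  induction busy with
  | nil => intro easy _; rfl
  | cons b rest ih =>
    intro easy hs
    rw [List.pairwise_cons] at hs
    simp only [freeLoopA, release]
    by_cases h : b.1 > tim
    · rw [if_pos h, if_neg (by omega)]
      rw [pqPush_min b rest (fun y hy => by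
        have := hs.1 y hy; unfold plt at this
        rcases this with h1 | ⟨h1, h2⟩
        · exact Or.inl h1
        · exact Or.inr ⟨h1, le_of_lt h2⟩)]
    · rw [if_neg h, if_pos (by omega)]
      exact ih _ hs.2

-- ---- invariant machinery ----

theorem inv_nodup_idx {servers : List Int} {easy busy : List (Int × Int)}
    (h : PVInv servers easy busy) : (easy.map Prod.snd ++ busy.map Prod.snd).Nodup := by
  refine h.2.2.2.nodup_iff.2 ?_
  exact List.Nodup.map (fun a b hab => by exact_mod_cast hab) List.nodup_range

theorem inv_idx_mem {servers : List Int} {easy busy : List (Int × Int)}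
    (h : PVInv servers easy busy) {i : Int}
    (hi : i ∈ easy.map Prod.snd ++ busy.map Prod.snd) :
    ∃ k : Nat, k < servers.length ∧ i = (k : Int) := by
  have := h.2.2.2.mem_iff.1 hi
  simp only [List.mem_map, List.mem_range] at this
  obtain ⟨k, hk, hik⟩ := this
  exact ⟨k, hk, hik.symm⟩

theorem inv_length {servers : List Int} {easy busy : List (Int × Int)}
    (h : PVInv servers easy busy) : easy.length + busy.length = servers.length := by
  have := h.2.2.2.length_eq
  simpa using this

-- after an assignment: the popped head moves (re-keyed) from the free queue into busy
theorem inv_assign {servers : List Int} {e : Int × Int} {rest busy : List (Int × Int)}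
    (f : Int) (h : PVInv servers (e :: rest) busy) :
    PVInv servers rest (pqPush (f, e.2) busy) := by
  obtain ⟨hE, hB, hF, hperm⟩ := h
  rw [List.pairwise_cons] at hE
  have hnd := inv_nodup_idx ⟨List.pairwise_cons.2 hE, hB, hF, hperm⟩
  have hnotin : (f, e.2) ∉ busy := by
    intro hmem
    have h1 : e.2 ∈ (e :: rest).map Prod.snd := by simp
    have h2 : e.2 ∈ busy.map Prod.snd := List.mem_map.2 ⟨(f, e.2), hmem, rfl⟩

    exact (List.nodup_append.1 hnd).2.2 _ h1 _ h2 rfl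
  refine ⟨hE.2, pqPush_pairwise hB hnotin, fun p hp => hF p (List.mem_cons_of_mem _ hp), ?_⟩
  refine List.Perm.trans ?_ hperm
  have hm : (pqPush (f, e.2) busy).map Prod.snd |>.Perm (e.2 :: busy.map Prod.snd) :=
    (pqPush_perm _ _).map Prod.snd
  simp only [List.map_cons, List.cons_append]
  exact (hm.append_left _).trans List.perm_middle

theorem release_inv {servers : List Int} (tim : Int) :
    ∀ (busy easy : List (Int × Int)), PVInv servers easy busy →
    PVInv servers (release servers tim busy easy).2 (release servers tim busy easy).1 := by
  intro busy
  induction busy with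
  | nil => intro easy h; exact h
  | cons b rest ih =>
    intro easy h
    obtain ⟨hE, hB, hF, hperm⟩ := h
    rw [List.pairwise_cons] at hB
    simp only [release]
    by_cases hle : b.1 ≤ tim
    · rw [if_pos hle]
      refine ih _ ?_
      have hnd := inv_nodup_idx (servers := servers) ⟨hE, List.pairwise_cons.2 hB, hF, hperm⟩
      obtain ⟨k, hk, hbk⟩ := inv_idx_mem (servers := servers)
        ⟨hE, List.pairwise_cons.2 hB, hF, hperm⟩ (i := b.2) (by simp)
      have hget : PySem.List.pyGet? servers b.2 = some servers[k] := by
        rw [hbk]; exact PySem.List.pyGet?_ofNat (xs := servers) (n := k) hk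
      have hw : wOf servers b.2 = servers[k] := by simp [wOf, PySem.List.pyGetD, hget]
      have hnotin : (wOf servers b.2, b.2) ∉ easy := by
        intro hmem
        have h1 : b.2 ∈ easy.map Prod.snd := List.mem_map.2 ⟨_, hmem, rfl⟩
        have h2 : b.2 ∈ (b :: rest).map Prod.snd := by simp
        exact (List.nodup_append.1 hnd).2.2 _ h1 _ h2 rfl
      refine ⟨pqPush_pairwise hE hnotin, hB.2, ?_, ?_⟩
      · intro p hp
        rcases mem_pqPush.1 hp with rfl | hp
        · simpa [hw] using hget
        · exact hF p hp
      · refine List.Perm.trans ?_ hperm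
        have hm : (pqPush (wOf servers b.2, b.2) easy).map Prod.snd |>.Perm
            (b.2 :: easy.map Prod.snd) := (pqPush_perm _ _).map Prod.snd
        simp only [List.map_cons]
        refine (hm.append_right _).trans ?_
        simp only [List.cons_append]
        exact List.perm_middle.symm
    · rw [if_neg hle]
      exact ⟨hE, List.pairwise_cons.2 hB, hF, hperm⟩

theorem release_keeps_nonempty (servers : List Int) (tim : Int) :
    ∀ (busy easy : List (Int × Int)), easy ≠ [] →
    (release servers tim busy easy).2 ≠ [] := by
  intro busy
  induction busy with
  | nil => intro easy h; exact h
  | cons b rest ih =>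
    intro easy h
    simp only [release]
    by_cases hle : b.1 ≤ tim
    · rw [if_pos hle]
      refine ih _ ?_
      cases easy <;> simp [pqPush]
      split <;> simp
    · rw [if_neg hle]; exact h

-- ---- the main loop equality ----

theorem go_eq (servers : List Int) (hne : servers ≠ []) :
    ∀ (tasks res : List Int) (busy easy : List (Int × Int)) (tim tind : Int),
    PVInv servers easy busy →
    goA servers tasks res busy easy tim tind = goB servers tasks res easy busy tim tind := by
  intro tasks
  induction tasks with
  | nil => intro res busy easy tim tind _; rfl
  | cons t ts ih =>
    intro res busy easy tim tind hinv
    have hn : 0 < servers.length := List.length_pos_iff.2 hne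
    by_cases hb : busy = []
    · subst hb
      have hlen := inv_length hinv
      obtain ⟨e, rest, rfl⟩ : ∃ e rest, easy = e :: rest := by
        cases easy with
        | nil => simp at hlen; omega
        | cons e rest => exact ⟨e, rest, rfl⟩
      simp only [goA, goB]
      rw [dance_eq servers _ t res [] e rest hinv.1 hinv.2.2.1]
      simp only [release]
      exact ih _ _ _ _ _ (inv_assign _ hinv)
    · have hrel := freeLoop_eq servers (max tind tim) busy easy hinv.2.1
      have hinv' := release_inv (servers := servers) (max tind tim) busy easy hinv
      simp only [goA, goB, if_neg hb]
      rw [hrel]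
      set r := release servers (max tind tim) busy easy with hr
      by_cases he : r.2 = []
      · rw [if_neg (by simp [he])]
        have hlen' := inv_length hinv'
        obtain ⟨b1, brest, hb1⟩ : ∃ b1 brest, r.1 = b1 :: brest := by
          cases hcase : r.1 with
          | nil => rw [hcase, he] at hlen'; simp at hlen'; omega
          | cons b1 brest => exact ⟨b1, brest, rfl⟩
        rw [hb1, he]
        dsimp only
        have hstep : release servers b1.1 (b1 :: brest) [] =
            release servers b1.1 brest (pqPush (wOf servers b1.2, b1.2) []) := by
          simp only [release, if_pos (le_refl b1.1)]
        have hinv2 : PVInv servers (release servers b1.1 (b1 :: brest) []).2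
            (release servers b1.1 (b1 :: brest) []).1 := by
          refine release_inv _ _ _ ?_
          rw [← hb1, ← he]; exact hinv'
        rw [hstep] at hinv2
        have hne2 : (release servers b1.1 brest (pqPush (wOf servers b1.2, b1.2) [])).2 ≠ [] :=
          release_keeps_nonempty _ _ _ _ (by simp [pqPush])
        have hrel2 := freeLoop_eq servers b1.1 brest (pqPush (wOf servers b1.2, b1.2) [])
          (by
            have := hinv'.2.1
            rw [hb1, List.pairwise_cons] at this
            exact this.2)
        rw [hrel2, hstep]
        set r2 := release servers b1.1 brest (pqPush (wOf servers b1.2, b1.2) []) with hr2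
        obtain ⟨e, rest, hre⟩ : ∃ e rest, r2.2 = e :: rest := by
          cases hcase : r2.2 with
          | nil => exact absurd hcase hne2
          | cons e rest => exact ⟨e, rest, rfl⟩
        rw [hre]
        dsimp only
        rw [hre] at hinv2
        rw [dance_eq servers _ t res r2.1 e rest hinv2.1 hinv2.2.2.1]
        exact ih _ _ _ _ _ (inv_assign _ hinv2)
      · rw [if_pos (by simp [he])]
        obtain ⟨e, rest, hre⟩ : ∃ e rest, r.2 = e :: rest := by
          cases hcase : r.2 with
          | nil => exact absurd hcase he
          | cons e rest => exact ⟨e, rest, rfl⟩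
        rw [hre]
        dsimp only
        rw [hre] at hinv'
        rw [dance_eq servers _ t res r.1 e rest hinv'.1 hinv'.2.2.1]
        exact ih _ _ _ _ _ (inv_assign _ hinv')

-- ---- the initial queues coincide and satisfy the invariant ----

theorem foldl_push_perm (L : List (Int × Int)) :
    ∀ acc, (L.foldl (fun e x => pqPush x e) acc).Perm (acc ++ L) := by
  induction L with
  | nil => intro acc; simp
  | cons x L' ih =>
    intro acc
    simp only [List.foldl_cons]
    refine (ih (pqPush x acc)).trans ?_
    refine List.Perm.trans (((pqPush_perm x acc).append_right L')) ?_
    simpa using List.perm_middle.symm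

theorem foldl_push_pairwise (L : List (Int × Int)) :
    ∀ acc, acc.Pairwise plt → (acc ++ L).Nodup →
    (L.foldl (fun e x => pqPush x e) acc).Pairwise plt := by
  induction L with
  | nil => intro acc h _; simpa using h
  | cons x L' ih =>
    intro acc h hnd
    simp only [List.foldl_cons]
    have hx : x ∉ acc := by
      intro hmem
      exact (List.nodup_append.1 hnd).2.2 _ hmem _ (by simp) rfl
    refine ih _ (pqPush_pairwise h hx) ?_
    refine ((pqPush_perm x acc).append_right L').nodup_iff.2 ?_
    exact (List.perm_middle.symm : (x :: acc ++ L').Perm (acc ++ x :: L')).nodup_iff.2 hnd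

def initL (servers : List Int) : List (Int × Int) :=
  (PySem.List.pyRange 0 (servers.length : Int) 1).map (fun i => (wOf servers i, i))

theorem initL_snd (servers : List Int) :
    (initL servers).map Prod.snd = (List.range servers.length).map (fun k : Nat => (k : Int)) := by
  unfold initL
  rw [PySem.List.pyRange_one]
  simp

theorem initL_nodup (servers : List Int) : (initL servers).Nodup := by
  have h := initL_snd servers
  have hnd : ((initL servers).map Prod.snd).Nodup := by
    rw [h]
    exact List.Nodup.map (fun a b hab => by exact_mod_cast hab) List.nodup_range
  exact hnd.of_map

theorem initL_faithful (servers : List Int) : pvFaithful servers (initL servers) := by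
  intro p hp
  unfold initL at hp
  rw [List.mem_map] at hp
  obtain ⟨i, hi, rfl⟩ := hp
  rw [PySem.List.mem_pyRange_one] at hi
  have hk : i.toNat < servers.length := by omega
  have hget : PySem.List.pyGet? servers i = some servers[i.toNat] := by
    have := PySem.List.pyGet?_ofNat (xs := servers) (n := i.toNat) hk
    rw [show ((i.toNat : Nat) : Int) = i by omega] at this
    exact this
  simp [wOf, PySem.List.pyGetD, hget]

theorem easy0_eq (servers : List Int) :
    (PySem.List.pyRange 0 (servers.length : Int) 1).foldl
      (fun e i => pqPush (wOf servers i, i) e) []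
    = (PySem.List.enumerate servers 0).foldl (fun fr p => pqPush (p.2, p.1) fr) [] := by
  rw [PySem.List.enumerate_eq_map_pyRange (d := 0), List.foldl_map]
  rfl

theorem init_inv (servers : List Int) :
    PVInv servers ((PySem.List.pyRange 0 (servers.length : Int) 1).foldl
      (fun e i => pqPush (wOf servers i, i) e) []) [] := by
  have hfold : (PySem.List.pyRange 0 (servers.length : Int) 1).foldl
      (fun e i => pqPush (wOf servers i, i) e) []
      = (initL servers).foldl (fun e x => pqPush x e) [] := by
    unfold initL
    rw [List.foldl_map]
  rw [hfold]
  have hperm := foldl_push_perm (initL servers) []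
  simp only [List.nil_append] at hperm
  refine ⟨?_, List.Pairwise.nil, ?_, ?_⟩
  · exact foldl_push_pairwise (initL servers) [] List.Pairwise.nil (by simpa using initL_nodup servers)
  · intro p hp
    exact initL_faithful servers p (hperm.mem_iff.1 hp)
  · simp only [List.map_nil, List.append_nil]
    refine List.Perm.trans (hperm.map Prod.snd) ?_
    rw [initL_snd]

-- ===== VERDICT (by name: the statement is the Claim_ definition above) =====
theorem assignTasks_spec : Claim_equal_assignTasks := by
  unfold Claim_equal_assignTasks
  intro servers tasks _ hpre
  unfold Spec_assignTasks assignTasks assignTasks_alt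
  rw [← easy0_eq]
  cases tasks with
  | nil => rfl
  | cons t ts =>
    have hne : servers ≠ [] := by
      rcases hpre with h | h
      · exact h
      · simp at h
    exact go_eq servers hne (t :: ts) [] [] _ 0 0 (init_inv servers)
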